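-- pv_equiv track=rewrite | github.com/pierfrancescomartinello/IT-DC-Portfolio | Ex 4 - LZ Family copy.py | ELR
-- ===== SOURCE A (Python) =====
-- def ELR(T):
--     a = ""
--     b = T[0]
--     elr = 0
--     for i in range(1,len(T)):
--         if b == T[i] and a != b: elr += 1 # We get here when the last three characters met are "zll" with z !=l
--         a = b
--         b = T[i]
--     return elr
-- ===== SOURCE B (Python) =====
-- def ELR(T):
--     # Two-pointer run scan: count maximal runs of equal characters of length >= 2.
--     elr = 0
--     i = 0
--     n = len(T)
--     while i < n:
--         j = i + 1
--         while j < n and T[j] == T[i]: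
--             j += 1
--         if j - i >= 2:
--             elr += 1
--         i = j
--     return elr
-- ===== Notes on version B (the rewrite author's own statement) =====
-- stated objective: alternative
-- what changed: Replaces A's per-index loop with a two-character lookback state (a,b) by a two-pointer scan over maximal runs of equal characters, counting runs of length >= 2.
import Mathlib
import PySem

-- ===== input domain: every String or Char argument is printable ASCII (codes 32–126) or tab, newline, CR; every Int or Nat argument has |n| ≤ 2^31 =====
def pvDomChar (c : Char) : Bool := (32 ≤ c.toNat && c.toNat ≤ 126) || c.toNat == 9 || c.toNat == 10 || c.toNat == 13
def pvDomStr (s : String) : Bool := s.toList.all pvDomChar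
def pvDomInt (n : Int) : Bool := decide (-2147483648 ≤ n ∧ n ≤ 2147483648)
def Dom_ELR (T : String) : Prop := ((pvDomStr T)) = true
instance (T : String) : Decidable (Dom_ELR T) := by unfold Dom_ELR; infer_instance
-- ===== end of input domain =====

-- B replaces A's per-index lookback loop (state a,b) by a two-pointer scan over maximal
-- runs of equal characters (counting runs of length >= 2); same O(n) cost, different shape.


-- ===== PORT A =====
-- Python's `a`/`b` are one-character strings, with `a = ""` initially: modelled as
-- Option Char (none = ""). T[i] inside `for i in range(1, len(T))` is always in range,
-- so it is ported with pyGetD and an arbitrary default (exact there); T[0] is pyGet?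
-- (none = IndexError, excluded by Pre_).
def ELRstep (st : Option Char × Char × Int) (ti : Char) : Option Char × Char × Int :=
  let a := st.1
  let b := st.2.1
  let elr := st.2.2 + if ti = b ∧ a ≠ some b then 1 else 0  -- if b == T[i] and a != b: elr += 1
  (some b, ti, elr)                                          -- a = b; b = T[i]

def ELR (T : String) : Int :=
  let cs := T.toList
  match PySem.List.pyGet? cs 0 with
  | none => 0   -- Python raises IndexError here; these inputs are outside Pre_ELR
  | some b0 =>
    ((PySem.List.pyRange 1 (cs.length : Int) 1).foldl
      (fun st i => ELRstep st (PySem.List.pyGetD cs i ' ')) (none, b0, 0)).2.2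

-- ===== PORT B =====
-- Source B's outer `while i < n` walks run by run: the inner `while j < n and T[j] == T[i]`
-- splits the tail of the current run (takeWhile/dropWhile is exactly that split), and
-- `j - i >= 2` iff the takeWhile part is nonempty. The Nat fuel only makes the
-- recursion structural; it starts at the list length and never runs out.
def ELRrunsF : Nat → List Char → Int
  | _, [] => 0
  | 0, _ :: _ => 0   -- unreachable: fuel starts at the length and dominates it throughout
  | fuel + 1, c :: t =>
    (if t.takeWhile (· == c) ≠ [] then 1 else 0) + ELRrunsF fuel (t.dropWhile (· == c))

def ELR_alt (T : String) : Int := ELRrunsF T.toList.length T.toList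

-- ===== PRECONDITION & SPEC =====
-- Pre_ excludes exactly the empty string, on which A raises IndexError (T[0]).
def Pre_ELR (T : String) : Prop := T.toList ≠ []
instance (T : String) : Decidable (Pre_ELR T) := by unfold Pre_ELR; infer_instance
def pvWitness_ELR : String := "aabba"

def Spec_ELR (T : String) (out : Int) : Prop := out = ELR_alt T
instance (T : String) (out : Int) : Decidable (Spec_ELR T out) := by unfold Spec_ELR; infer_instance

-- ===== CLAIM (what is proved, stated in full; the proofs are below) =====
def Claim_equal_ELR : Prop := ∀ (T : String), Dom_ELR T → Pre_ELR T → Spec_ELR T (ELR T)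

-- ===== LEMMAS AND PROOFS =====

-- The fuel is irrelevant as long as it dominates the length.
lemma ELRrunsF_congr : ∀ (f1 f2 : Nat) (l : List Char),
    l.length ≤ f1 → l.length ≤ f2 → ELRrunsF f1 l = ELRrunsF f2 l := by
  intro f1
  induction f1 with
  | zero =>
    intro f2 l h1 _
    cases l with
    | nil => cases f2 <;> rfl
    | cons c t => simp at h1
  | succ f1' ih =>
    intro f2 l h1 h2
    cases l with
    | nil => cases f2 <;> rfl
    | cons c t =>
      cases f2 with
      | zero => simp at h2
      | succ f2' =>
        simp only [ELRrunsF]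
        congr 1
        exact ih f2' _
          (le_trans (List.length_dropWhile_le _ _) (by simpa using h1))
          (le_trans (List.length_dropWhile_le _ _) (by simpa using h2))

-- B's result, with the canonical fuel, as a function of the list.
def Runs (l : List Char) : Int := ELRrunsF l.length l

lemma Runs_nil : Runs [] = 0 := rfl

lemma Runs_cons (c : Char) (t : List Char) :
    Runs (c :: t) = (if t.takeWhile (· == c) ≠ [] then 1 else 0)
      + Runs (t.dropWhile (· == c)) := by
  simp only [Runs, List.length_cons, ELRrunsF]
  congr 1
  exact ELRrunsF_congr _ _ _ (List.length_dropWhile_le _ _) le_rfl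

-- Invariant of A's loop: with lookback state (a, b), the remaining fold counts exactly the
-- runs of length ≥ 2 of (b :: l) — except that when a = b the current run is already
-- counted, so only the remainder after it contributes.
lemma elr_fold_runs (l : List Char) :
    ∀ (a : Option Char) (b : Char) (elr : Int),
      (l.foldl ELRstep (a, b, elr)).2.2
      = elr + (if a = some b then Runs (l.dropWhile (· == b)) else Runs (b :: l)) := by
  induction l with
  | nil =>
    intro a b elr
    by_cases h : a = some b <;> simp [h, Runs_nil, Runs_cons]
  | cons d t ih =>
    intro a b elr
    simp only [List.foldl_cons, ELRstep]
    rw [ih]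
    by_cases hdb : d = b
    · subst hdb
      by_cases hab : a = some d <;>
        simp [hab, Runs_cons, List.takeWhile, List.dropWhile] <;> ring
    · have hbf : (d == b) = false := by simp [hdb]
      by_cases hab : a = some b <;>
        simp [hab, hdb, Runs_cons, List.takeWhile, List.dropWhile, hbf] <;>
        exact fun h => absurd h.symm hdb

-- ===== VERDICT (by name: the statement is the Claim_ definition above) =====
theorem ELR_spec : Claim_equal_ELR := by
  intro T _ hpre
  unfold Spec_ELR ELR ELR_alt
  cases hcs : T.toList with
  | nil => exact absurd hcs hpre
  | cons c0 rest =>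
    have hget : PySem.List.pyGet? (c0 :: rest) (0 : Int) = some c0 := by
      simp [PySem.List.pyGet?, PySem.List.pyIdx?]
    simp only [hget]
    rw [PySem.List.foldl_pyRange_pyGetD' (xs := c0 :: rest) (a := 1) (d := ' ')
      ELRstep ((none : Option Char), c0, (0 : Int)) (by omega)]
    simp only [Int.toNat_one, List.drop_succ_cons, List.drop_zero]
    rw [elr_fold_runs]
    simp [Runs]
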